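-- pv_equiv track=rewrite | github.com/c0pson/Python_projects | lsoCounter/counterBetter.py | check
-- ===== SOURCE A (Python) =====
-- def check(deafultList, list, times):
--     countPoints = 0
--     if times == 0:
--         countPoints -= 2
--     elif 2 > times and times != 0:
--         if list[0] != deafultList[0] or list[0] != deafultList[1]:
--             countPoints +=1
--     else:
--         for i in range(2):
--             if list[i] == deafultList[i]:
--                 countPoints += 2
--             else:
--                 countPoints += 1
--         for i in range(times - 2):
--             countPoints += 1
--     return countPoints
-- ===== SOURCE B (Python) =====
-- def check(deafultList, list, times):
--     if times == 0:
--         return -2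
--     if times < 2:
--         return 0 if list[0] == deafultList[0] == deafultList[1] else 1
--     return times + (list[0] == deafultList[0]) + (list[1] == deafultList[1])
-- ===== Notes on version B (the rewrite author's own statement) =====
-- stated objective: simpler
-- what changed: Replaced the two counting loops (a fixed comparison loop plus a times-2 increment loop) with a closed-form arithmetic expression: times plus one point per matching position.
import Mathlib
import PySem

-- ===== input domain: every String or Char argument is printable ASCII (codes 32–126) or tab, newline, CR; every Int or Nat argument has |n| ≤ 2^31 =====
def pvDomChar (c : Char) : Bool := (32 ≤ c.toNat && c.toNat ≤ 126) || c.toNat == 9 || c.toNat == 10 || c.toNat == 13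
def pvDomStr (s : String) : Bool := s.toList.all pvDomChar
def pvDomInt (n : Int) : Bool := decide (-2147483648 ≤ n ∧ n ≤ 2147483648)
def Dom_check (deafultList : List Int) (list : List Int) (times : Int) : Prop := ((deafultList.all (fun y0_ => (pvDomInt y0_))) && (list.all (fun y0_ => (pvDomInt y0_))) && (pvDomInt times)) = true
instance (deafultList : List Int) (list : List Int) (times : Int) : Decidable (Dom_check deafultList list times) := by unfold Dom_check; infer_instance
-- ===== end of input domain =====

-- B replaces A's fixed comparison loop and its times-2 increment loop by one arithmetic expression
-- (objective: simpler; not measurably faster on the timing inputs).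

-- ===== PORT A =====
-- literal port of A; the indexing uses pyGet? with getD 0 — Pre_check guarantees every index is in range,
-- so the default is never taken on admitted inputs
def check (deafultList : List Int) (list : List Int) (times : Int) : Int :=
  let countPoints : Int := 0
  if times = 0 then countPoints - 2
  else if 2 > times ∧ times ≠ 0 then
    if (PySem.List.pyGet? list 0).getD 0 ≠ (PySem.List.pyGet? deafultList 0).getD 0 ∨
       (PySem.List.pyGet? list 0).getD 0 ≠ (PySem.List.pyGet? deafultList 1).getD 0 then
      countPoints + 1
    else countPoints
  else
    let cp1 := (PySem.List.pyRange 0 2 1).foldl (fun acc i =>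
      if (PySem.List.pyGet? list i).getD 0 = (PySem.List.pyGet? deafultList i).getD 0 then acc + 2 else acc + 1) countPoints
    (PySem.List.pyRange 0 (times - 2) 1).foldl (fun acc _ => acc + 1) cp1

-- ===== PORT B =====
def check_alt (deafultList : List Int) (list : List Int) (times : Int) : Int :=
  if times = 0 then -2
  else if times < 2 then
    if (PySem.List.pyGet? list 0).getD 0 = (PySem.List.pyGet? deafultList 0).getD 0 ∧
       (PySem.List.pyGet? deafultList 0).getD 0 = (PySem.List.pyGet? deafultList 1).getD 0 then 0 else 1
  else
    times + (if (PySem.List.pyGet? list 0).getD 0 = (PySem.List.pyGet? deafultList 0).getD 0 then 1 else 0)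
          + (if (PySem.List.pyGet? list 1).getD 0 = (PySem.List.pyGet? deafultList 1).getD 0 then 1 else 0)

-- ===== PRECONDITION & SPEC =====
-- Pre_ excludes exactly the inputs where Python A raises IndexError:
-- times ≠ 0 needs list[0] and deafultList[0]; deafultList[1] is needed unless the first
-- comparison short-circuits (list[0] != deafultList[0]); times ≥ 2 needs indices 0 and 1 of both lists.
def Pre_check (deafultList : List Int) (list : List Int) (times : Int) : Prop :=
  times = 0 ∨
  (times < 2 ∧ 1 ≤ list.length ∧
    (2 ≤ deafultList.length ∨
      (1 ≤ deafultList.length ∧ (PySem.List.pyGet? list 0).getD 0 ≠ (PySem.List.pyGet? deafultList 0).getD 0))) ∨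
  (2 ≤ times ∧ 2 ≤ list.length ∧ 2 ≤ deafultList.length)
instance (deafultList : List Int) (list : List Int) (times : Int) : Decidable (Pre_check deafultList list times) := by unfold Pre_check; infer_instance
def pvWitness_check : List Int × List Int × Int := ([1, 2], [1, 3], 4)
def Spec_check (deafultList : List Int) (list : List Int) (times : Int) (out : Int) : Prop := out = check_alt deafultList list times
instance (deafultList : List Int) (list : List Int) (times : Int) (out : Int) : Decidable (Spec_check deafultList list times out) := by unfold Spec_check; infer_instance

-- ===== CLAIM =====
def Claim_equal_check : Prop := ∀ (deafultList : List Int) (list : List Int) (times : Int), Dom_check deafultList list times → Pre_check deafultList list times → Spec_check deafultList list times (check deafultList list times)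

-- ===== LEMMAS AND PROOFS =====
-- the O(times) increment loop of A adds exactly the length of the range
theorem foldl_add_one (L : List Int) (c : Int) :
    L.foldl (fun acc _ => acc + 1) c = c + L.length := by
  induction L generalizing c with
  | nil => simp
  | cons x t ih => simp [List.foldl, ih]; omega

-- ===== VERDICT =====
theorem check_spec : Claim_equal_check := by
  intro d l t _ hpre
  unfold Spec_check check check_alt
  rcases hpre with h0 | ⟨h1, hl, -⟩ | ⟨h2, hl, hd⟩
  · simp [h0]
  · by_cases h0 : t = 0
    · simp [h0]
    · have ht2 : (2 : Int) > t := by omega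
      have htne : t ≠ 0 := h0
      simp only [if_neg htne, if_pos (And.intro ht2 htne), if_pos h1]
      set l0 := (PySem.List.pyGet? l 0).getD 0 with hl0
      set d0 := (PySem.List.pyGet? d 0).getD 0 with hd0
      set d1 := (PySem.List.pyGet? d 1).getD 0 with hd1
      by_cases e1 : l0 = d0 <;> by_cases e2 : d0 = d1 <;> simp [e1, e2]
  · have htne : t ≠ 0 := by omega
    have hnlt : ¬ ((2 : Int) > t ∧ t ≠ 0) := by omega
    have hnlt2 : ¬ t < 2 := by omega
    have hr2 : PySem.List.pyRange 0 2 1 = [0, 1] := by decide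
    simp only [if_neg htne, if_neg hnlt, if_neg hnlt2, hr2, List.foldl, foldl_add_one,
      PySem.List.length_pyRange_one]
    have hcast : ((t - 2 - 0).toNat : Int) = t - 2 := by omega
    set l0 := (PySem.List.pyGet? l 0).getD 0 with hl0
    set l1 := (PySem.List.pyGet? l 1).getD 0 with hl1
    set d0 := (PySem.List.pyGet? d 0).getD 0 with hd0
    set d1 := (PySem.List.pyGet? d 1).getD 0 with hd1
    by_cases e1 : l0 = d0 <;> by_cases e2 : l1 = d1 <;> simp [e1, e2] <;> omega
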